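-- pv_equiv track=rewrite | github.com/VictorF13/terminal-dex-scraper | src/terminal_dex_scraper/gen_1/red_and_blue/utils.py | _remove_block
-- ===== SOURCE A (Python) =====
-- def _remove_block(lines: list[str], block: list[str]) -> list[str]:
--     block_length = len(block)
--     i = 0
--     while i <= len(lines) - block_length:
--         if all(lines[i + k].rstrip() == block[k] for k in range(block_length)):
--             del lines[i : i + block_length]
--             break
--         i += 1
--     return lines
-- ===== SOURCE B (Python) =====
-- _M = (1 << 61) - 1
-- _B = 1000003
--
-- def _line_hash(s: str) -> int:
--     # base-256 value of the ASCII bytes, reduced mod _M (exact on the ASCII domain)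
--     return int.from_bytes(s.encode(), "big") % _M
--
-- def _fold_hash(xs) -> int:
--     h = 0
--     for x in xs:
--         h = (h * _B + x) % _M
--     return h
--
-- def _remove_block(lines: list[str], block: list[str]) -> list[str]:
--     # Rabin-Karp: rstrip every line once, hash each stripped line, then slide a
--     # rolling window hash over them; compare the actual window only on a hash hit.
--     # (Unlike A, this does not mutate `lines`; the return value is the same.)
--     m = len(block)
--     n = len(lines)
--     if m == 0 or m > n:
--         return lines
--     stripped = [s.rstrip() for s in lines]
--     lh = [_line_hash(s) for s in stripped]
--     hb = _fold_hash(_line_hash(b) for b in block)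
--     pw = pow(_B, m - 1, _M)
--     hw = _fold_hash(lh[:m])
--     i = 0
--     while True:
--         if hw == hb and stripped[i:i + m] == block:
--             return lines[:i] + lines[i + m:]
--         if i + m >= n:
--             return lines
--         hw = ((hw - lh[i] * pw) * _B + lh[i + m]) % _M
--         i += 1
-- ===== Notes on version B (the rewrite author's own statement) =====
-- stated objective: alternative
-- what changed: A slides an index window, re-rstripping lines inside an all(...) rescan at every position and deleting the matched slice in place; B is a Rabin-Karp search: each line is rstripped and hashed once, a rolling window hash slides over the line hashes, the actual window is compared only on a hash hit, and the result is a freshly concatenated list.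
import Mathlib
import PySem

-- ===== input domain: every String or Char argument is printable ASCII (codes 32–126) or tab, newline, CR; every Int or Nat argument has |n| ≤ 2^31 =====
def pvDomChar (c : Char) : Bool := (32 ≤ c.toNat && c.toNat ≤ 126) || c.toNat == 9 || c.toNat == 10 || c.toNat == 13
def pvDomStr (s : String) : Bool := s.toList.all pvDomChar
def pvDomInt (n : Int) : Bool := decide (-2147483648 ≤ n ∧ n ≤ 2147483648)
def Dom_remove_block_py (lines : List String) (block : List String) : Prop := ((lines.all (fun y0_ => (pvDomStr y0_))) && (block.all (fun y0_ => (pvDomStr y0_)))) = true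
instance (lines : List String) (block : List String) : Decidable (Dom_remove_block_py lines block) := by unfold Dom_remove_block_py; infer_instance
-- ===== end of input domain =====

-- B replaces A's per-window all(...) rescan (which re-rstrips lines at every window) by a
-- Rabin-Karp scan: every line rstripped and hashed once, a rolling window hash, and the actual
-- window compared only on a hash hit.  Same return value; A mutates `lines` in place while B
-- builds a fresh list — the equivalence proved here is about the RETURN value only.

-- ===== PORT A =====
-- while i <= len(lines) - block_length: if all(lines[i+k].rstrip() == block[k] for k in range(m)): del lines[i:i+m]; break; i += 1
-- lines[i+k] is always in range when the guard holds (i+m ≤ n, k < m), so getD is exact here;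
-- del lines[i:i+m] followed by return gives lines[:i] + lines[i+m:] = take i ++ drop (i+m)
-- (Python slice with in-range natural bounds; PySem.List.slice_to_natCast/slice_from_natCast).
def removeALoop (lines block : List String) (i : Nat) : List String :=
  if hg : (i : Int) ≤ (lines.length : Int) - (block.length : Int) then
    if (List.range block.length).all
        (fun k => PySem.Str.rstrip (lines.getD (i + k) "") == block.getD k "") then
      lines.take i ++ lines.drop (i + block.length)
    else removeALoop lines block (i + 1)
  else lines
termination_by lines.length + 1 - i
decreasing_by omega

def remove_block_py (lines : List String) (block : List String) : List String :=
  removeALoop lines block 0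

-- ===== PORT B =====
def pvM : Int := 2305843009213693951   -- _M = (1 << 61) - 1
def pvB : Int := 1000003               -- _B

-- _line_hash: int.from_bytes(s.encode(), "big") % _M; on the ASCII domain encode() is one byte
-- per character, so the int is the base-256 value of the code points.
def lineHash (s : String) : Int :=
  PySem.Int.mod (s.toList.foldl (fun h c => h * 256 + (c.toNat : Int)) 0) pvM

-- _fold_hash: h = 0; for x in xs: h = (h * _B + x) % _M
def foldHash (xs : List Int) : Int :=
  xs.foldl (fun h x => PySem.Int.mod (h * pvB + x) pvM) 0

-- the while-True loop; stripped[i:i+m] and lines[:i] + lines[i+m:] are Python slices with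
-- natural in-range bounds, exactly (·.drop i).take m resp. take i ++ drop (i+m); lh[i] and
-- lh[i+m] are in range whenever read, so getD is exact.
def rkLoop (lines stripped block : List String) (lh : List Int) (hb pw : Int)
    (i : Nat) (hw : Int) : List String :=
  if (hw == hb && ((stripped.drop i).take block.length == block)) then
    lines.take i ++ lines.drop (i + block.length)
  else if _h : lines.length ≤ i + block.length then lines
  else rkLoop lines stripped block lh hb pw (i + 1)
      (PySem.Int.mod ((hw - lh.getD i 0 * pw) * pvB + lh.getD (i + block.length) 0) pvM)
termination_by lines.length - i
decreasing_by omega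

-- pow(_B, m-1, _M) is ported by value as _B^(m-1) % _M (3-argument pow).
def remove_block_py_alt (lines : List String) (block : List String) : List String :=
  if block.length == 0 || lines.length < block.length then lines
  else
    let stripped := lines.map PySem.Str.rstrip
    let lh := stripped.map lineHash
    let hb := foldHash (block.map lineHash)
    let pw := PySem.Int.mod (pvB ^ (block.length - 1)) pvM
    rkLoop lines stripped block lh hb pw 0 (foldHash (lh.take block.length))

-- ===== PRECONDITION & SPEC =====
def Spec_remove_block_py (lines : List String) (block : List String) (out : List String) : Prop := out = remove_block_py_alt lines block
instance (lines : List String) (block : List String) (out : List String) : Decidable (Spec_remove_block_py lines block out) := by unfold Spec_remove_block_py; infer_instance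

-- ===== CLAIM (what is proved, stated in full; the proofs are below) =====
def Claim_equal_remove_block_py : Prop := ∀ (lines : List String) (block : List String), Dom_remove_block_py lines block → Spec_remove_block_py lines block (remove_block_py lines block)

-- ===== LEMMAS AND PROOFS =====

lemma pvM_pos : (0 : Int) < pvM := by unfold pvM; norm_num

lemma pymod_eq (a : Int) : PySem.Int.mod a pvM = a % pvM :=
  PySem.Int.mod_eq_emod_of_pos pvM_pos

-- the pure (un-reduced) polynomial the rolling hash tracks
def polyH (xs : List Int) : Int := xs.foldl (fun h x => h * pvB + x) 0

lemma polyH_from (xs : List Int) (h : Int) :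
    xs.foldl (fun a x => a * pvB + x) h = h * pvB ^ xs.length + polyH xs := by
  induction xs generalizing h with
  | nil => simp [polyH]
  | cons x xs ih =>
    simp only [List.foldl_cons, List.length_cons, polyH]
    rw [ih (h * pvB + x), ih ((0 : Int) * pvB + x)]
    ring

lemma polyH_cons (y : Int) (ys : List Int) :
    polyH (y :: ys) = y * pvB ^ ys.length + polyH ys := by
  show (y :: ys).foldl (fun a x => a * pvB + x) 0 = _
  rw [List.foldl_cons, polyH_from]
  ring

lemma polyH_append_singleton (ys : List Int) (x : Int) :
    polyH (ys ++ [x]) = polyH ys * pvB + x := by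
  simp [polyH, List.foldl_append]

lemma foldHash_from_modEq (xs : List Int) (h h' : Int) (hh : h % pvM = h' % pvM) :
    (xs.foldl (fun a x => PySem.Int.mod (a * pvB + x) pvM) h) % pvM =
    (xs.foldl (fun a x => a * pvB + x) h') % pvM := by
  induction xs generalizing h h' with
  | nil => simpa using hh
  | cons x xs ih =>
    simp only [List.foldl_cons]
    apply ih
    rw [pymod_eq, Int.emod_emod_of_dvd _ dvd_rfl]
    exact ((Int.ModEq.mul_right pvB hh).add_right x)

lemma foldHash_modEq (xs : List Int) : foldHash xs % pvM = polyH xs % pvM :=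
  foldHash_from_modEq xs 0 0 rfl

lemma foldHash_reduced (xs : List Int) (hne : xs ≠ []) :
    foldHash xs % pvM = foldHash xs := by
  unfold foldHash
  suffices h : ∀ (ys : List Int) (a : Int), ys ≠ [] →
      (ys.foldl (fun h x => PySem.Int.mod (h * pvB + x) pvM) a) % pvM =
      ys.foldl (fun h x => PySem.Int.mod (h * pvB + x) pvM) a from h xs 0 hne
  intro ys
  induction ys with
  | nil => intro a h; exact absurd rfl h
  | cons y ys ih =>
    intro a _
    rcases List.eq_nil_or_concat ys with h0 | _
    · subst h0
      simp only [List.foldl_cons, List.foldl_nil, pymod_eq]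
      exact Int.emod_emod_of_dvd _ dvd_rfl
    · cases ys with
      | nil =>
        simp only [List.foldl_cons, List.foldl_nil, pymod_eq]
        exact Int.emod_emod_of_dvd _ dvd_rfl
      | cons z zs =>
        rw [List.foldl_cons]
        exact ih _ (by simp)

-- window decomposition: for 1 ≤ m and i + m ≤ n the window at i is lh[i] :: mid and the
-- window at i+1 (when i + m < n) is mid ++ [lh[i+m]], with mid the shared middle part
lemma window_cons (lh : List Int) (m i : Nat) (hm : 1 ≤ m) (hin : i + m ≤ lh.length) :
    (lh.drop i).take m = lh.getD i 0 :: (lh.drop (i + 1)).take (m - 1) := by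
  have hi : i < lh.length := by omega
  have h1 : lh.drop i = lh[i] :: lh.drop (i + 1) := List.drop_eq_getElem_cons hi
  cases m with
  | zero => omega
  | succ m' =>
    rw [h1, List.getD_eq_getElem lh 0 hi, List.take_succ_cons]
    simp

lemma window_snoc (lh : List Int) (m i : Nat) (hm : 1 ≤ m) (hin : i + m < lh.length) :
    (lh.drop (i + 1)).take m = (lh.drop (i + 1)).take (m - 1) ++ [lh.getD (i + m) 0] := by
  have hlen : m - 1 < (lh.drop (i + 1)).length := by
    rw [List.length_drop]; omega
  conv_lhs => rw [show m = (m - 1) + 1 by omega]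
  rw [List.take_add_one, List.getElem?_eq_getElem hlen]
  have he : (lh.drop (i + 1))[m - 1]'hlen = lh.getD (i + m) 0 := by
    rw [List.getElem_drop, List.getD_eq_getElem lh 0 hin]
    congr 1
    omega
  rw [he]
  simp

lemma window_len (lh : List Int) (m i : Nat) (hin : i + m ≤ lh.length) :
    ((lh.drop i).take m).length = m := by
  simp [List.length_take, List.length_drop]; omega

-- the rolling update really moves the window hash one step to the right
lemma roll_update (lh : List Int) (m i : Nat) (hm : 1 ≤ m) (hin : i + m < lh.length) :
    PySem.Int.mod
      ((foldHash ((lh.drop i).take m) - lh.getD i 0 * PySem.Int.mod (pvB ^ (m - 1)) pvM) * pvB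
        + lh.getD (i + m) 0) pvM
    = foldHash ((lh.drop (i + 1)).take m) := by
  have hmid : ((lh.drop (i + 1)).take (m - 1)).length = m - 1 :=
    window_len lh (m - 1) (i + 1) (by omega)
  have hpoly_i : polyH ((lh.drop i).take m) =
      lh.getD i 0 * pvB ^ (m - 1) + polyH ((lh.drop (i + 1)).take (m - 1)) := by
    rw [window_cons lh m i hm (by omega), polyH_cons, hmid]
  have hpoly_i1 : polyH ((lh.drop (i + 1)).take m) =
      polyH ((lh.drop (i + 1)).take (m - 1)) * pvB + lh.getD (i + m) 0 := by
    rw [window_snoc lh m i hm hin, polyH_append_singleton]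
  have hne : (lh.drop (i + 1)).take m ≠ [] := by
    have := window_len lh m (i + 1) (by omega)
    intro h0; rw [h0] at this; simp at this; omega
  rw [pymod_eq, ← foldHash_reduced _ hne]
  have e1 : Int.ModEq pvM (foldHash ((lh.drop i).take m)) (polyH ((lh.drop i).take m)) :=
    foldHash_modEq _
  have e2 : Int.ModEq pvM (PySem.Int.mod (pvB ^ (m - 1)) pvM) (pvB ^ (m - 1)) := by
    rw [Int.ModEq, pymod_eq]; exact Int.emod_emod_of_dvd _ dvd_rfl
  have step : Int.ModEq pvM
      ((foldHash ((lh.drop i).take m) - lh.getD i 0 * PySem.Int.mod (pvB ^ (m - 1)) pvM) * pvB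
        + lh.getD (i + m) 0)
      ((polyH ((lh.drop i).take m) - lh.getD i 0 * pvB ^ (m - 1)) * pvB
        + lh.getD (i + m) 0) :=
    ((e1.sub (Int.ModEq.mul_left _ e2)).mul_right pvB).add_right _
  have hY : (polyH ((lh.drop i).take m) - lh.getD i 0 * pvB ^ (m - 1)) * pvB
        + lh.getD (i + m) 0 = polyH ((lh.drop (i + 1)).take m) := by
    rw [hpoly_i, hpoly_i1]; ring
  rw [foldHash_modEq, ← hY]
  exact step

-- A's per-window all(...) over rstripped elements coincides with the prefix comparison of the
-- pre-stripped list, for windows that fit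
lemma window_iff (lines block : List String) (i : Nat)
    (h : i + block.length ≤ lines.length) :
    (((lines.map PySem.Str.rstrip).drop i).take block.length = block) ↔
    ((List.range block.length).all
      (fun k => PySem.Str.rstrip (lines.getD (i + k) "") == block.getD k "") = true) := by
  rw [List.all_eq_true]
  simp only [List.mem_range, beq_iff_eq]
  constructor
  · intro he k hk
    have hk1 : i + k < lines.length := by omega
    have : (((lines.map PySem.Str.rstrip).drop i).take block.length)[k]'(by
        simp only [List.length_take, List.length_drop, List.length_map]; omega) = block[k]'hk := by
      simp [he]
    simpa [List.getElem_take, List.getElem_drop, List.getElem_map,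
      List.getD_eq_getElem?_getD, List.getElem?_eq_getElem, hk1, hk] using this
  · intro hp
    apply List.ext_getElem
    · simp only [List.length_take, List.length_drop, List.length_map]; omega
    · intro k hk1 hk2
      have hk : k < block.length := hk2
      have hkl : i + k < lines.length := by omega
      have := hp k hk
      simpa [List.getElem_take, List.getElem_drop, List.getElem_map,
        List.getD_eq_getElem?_getD, List.getElem?_eq_getElem, hkl, hk] using this

-- a matching window has the block's hash (hashing is a function of the window)
lemma win_hash_eq (lines block : List String) (i : Nat)
    (hwin : ((lines.map PySem.Str.rstrip).drop i).take block.length = block) :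
    foldHash ((((lines.map PySem.Str.rstrip).map lineHash).drop i).take block.length) =
    foldHash (block.map lineHash) := by
  congr 1
  rw [← List.map_drop, ← List.map_take, hwin]

lemma rk_loop_eq (lines block : List String) (i : Nat) (hw : Int)
    (hm : 1 ≤ block.length)
    (hin : i + block.length ≤ lines.length)
    (hhw : hw = foldHash ((((lines.map PySem.Str.rstrip).map lineHash).drop i).take block.length)) :
    rkLoop lines (lines.map PySem.Str.rstrip) block ((lines.map PySem.Str.rstrip).map lineHash)
      (foldHash (block.map lineHash)) (PySem.Int.mod (pvB ^ (block.length - 1)) pvM) i hw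
    = removeALoop lines block i := by
  induction hd : lines.length - i generalizing i hw with
  | zero => omega
  | succ d ih =>
    have hg : (i : Int) ≤ (lines.length : Int) - (block.length : Int) := by omega
    rw [removeALoop, dif_pos hg, rkLoop]
    by_cases hwin : ((lines.map PySem.Str.rstrip).drop i).take block.length = block
    · have hcond : (hw == foldHash (block.map lineHash) &&
          (((lines.map PySem.Str.rstrip).drop i).take block.length == block)) = true := by
        rw [Bool.and_eq_true, beq_iff_eq, beq_iff_eq]
        exact ⟨hhw.trans (win_hash_eq lines block i hwin), hwin⟩
      rw [if_pos hcond, if_pos ((window_iff lines block i hin).mp hwin)]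
    · have hcond : (hw == foldHash (block.map lineHash) &&
          (((lines.map PySem.Str.rstrip).drop i).take block.length == block)) = false := by
        rw [Bool.and_eq_false_iff]
        right; rw [beq_eq_false_iff_ne]; exact hwin
      have hacond : ¬ ((List.range block.length).all
          (fun k => PySem.Str.rstrip (lines.getD (i + k) "") == block.getD k "") = true) := by
        intro h; exact hwin ((window_iff lines block i hin).mpr h)
      rw [hcond, if_neg (by simp), if_neg hacond]
      by_cases hend : lines.length ≤ i + block.length
      · rw [dif_pos hend, removeALoop, dif_neg (by omega)]
      · rw [dif_neg hend]
        rw [hhw, roll_update ((lines.map PySem.Str.rstrip).map lineHash) block.length i hm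
          (by simp only [List.length_map]; omega)]
        exact ih (i + 1) _ (by omega) rfl (by omega)

-- ===== VERDICT (by name: the statement is the Claim_ definition above) =====
theorem remove_block_py_spec : Claim_equal_remove_block_py := by
  intro lines block _
  unfold Spec_remove_block_py remove_block_py remove_block_py_alt
  by_cases h0 : block.length = 0
  · rw [if_pos (by simp [h0]), removeALoop, dif_pos (by simp [h0])]
    rw [if_pos (by simp [h0])]
    simp [h0]
  · by_cases hbig : lines.length < block.length
    · rw [if_pos (by simp [hbig]), removeALoop, dif_neg (by omega)]
    · rw [if_neg (by simp [h0, hbig])]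
      refine (rk_loop_eq lines block 0 _ (by omega) (by omega) ?_).symm
      simp
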